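-- pv_equiv track=rewrite | github.com/dana11235/advent_of_code | 2024/day21/day21a.py | convert_to_directions
-- ===== SOURCE A (Python) =====
-- DIRECTIONS = {
--     '^': [0, 1],
--     'A': [0, 2],
--     '<': [1, 0],
--     'v': [1, 1],
--     '>': [1, 2],
--
-- }
--
-- def calc_diff(pos1, pos2):
--     return [pos1[0] - pos2[0], pos1[1] - pos2[1]]
--
-- def generate_move(diff, first=None):
--     output = []
--     horizontal_move = '>'
--     if diff[1] < 0:
--         horizontal_move = '<'
--     vertical_move = 'v'
--     if diff[0] < 0:
--         vertical_move = '^'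
--     horizontal_count = abs(diff[1])
--     vertical_count = abs(diff[0])
--     if first == 'h':
--         output.append(horizontal_move)
--         horizontal_count -= 1
--     elif first == 'v':
--         output.append(vertical_move)
--         vertical_count -= 1
--     for _ in range(horizontal_count):
--         output.append(horizontal_move)
--     for _ in range(vertical_count):
--         output.append(vertical_move)
--     output.append('A')
--     return output
--
-- def convert_to_directions(combo):
--     output_combo = []
--     position = [0, 2]
--     for letter in combo:
--         destination = DIRECTIONS[letter]
--         diff = calc_diff(destination, position)
--         if position[0] == 1 and position[1] == 0 and destination[0] == 0:
--             output_combo += generate_move(diff, 'h')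
--         elif destination[0] == 1 and destination[1] == 0 and position[0] == 0:
--             output_combo += generate_move(diff, 'v')
--         else:
--             output_combo += generate_move(diff)
--         position = destination
--     return output_combo
-- ===== SOURCE B (Python) =====
-- # B: a precomputed 25-entry transition table keyed by (previous key, next key);
-- # conversion is just table lookups, no coordinates or move generation at runtime.
-- MOVES = {
--     ('^', '^'): 'A',    ('^', 'A'): '>A',   ('^', '<'): 'v<A',  ('^', 'v'): 'vA',  ('^', '>'): '>vA',
--     ('A', '^'): '<A',   ('A', 'A'): 'A',    ('A', '<'): 'v<<A', ('A', 'v'): '<vA', ('A', '>'): 'vA',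
--     ('<', '^'): '>^A',  ('<', 'A'): '>>^A', ('<', '<'): 'A',    ('<', 'v'): '>A',  ('<', '>'): '>>A',
--     ('v', '^'): '^A',   ('v', 'A'): '>^A',  ('v', '<'): '<A',   ('v', 'v'): 'A',   ('v', '>'): '>A',
--     ('>', '^'): '<^A',  ('>', 'A'): '^A',   ('>', '<'): '<<A',  ('>', 'v'): '<A',  ('>', '>'): 'A',
-- }
--
-- def convert_to_directions(combo):
--     out = []
--     prev = 'A'  # start position [0,2] is the 'A' key
--     for letter in combo:
--         out.extend(MOVES[(prev, letter)])
--         prev = letter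
--     return out
-- ===== Notes on version B (the rewrite author's own statement) =====
-- stated objective: alternative
-- what changed: B replaces A's per-letter coordinate arithmetic (diff computation, order branches, move generation loops) with a precomputed 25-entry transition table keyed by (previous key, next key), so conversion is a single pass of table lookups; Pre_ excludes combos containing a character that is not a keypad key, on which A raises KeyError.
import Mathlib
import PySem

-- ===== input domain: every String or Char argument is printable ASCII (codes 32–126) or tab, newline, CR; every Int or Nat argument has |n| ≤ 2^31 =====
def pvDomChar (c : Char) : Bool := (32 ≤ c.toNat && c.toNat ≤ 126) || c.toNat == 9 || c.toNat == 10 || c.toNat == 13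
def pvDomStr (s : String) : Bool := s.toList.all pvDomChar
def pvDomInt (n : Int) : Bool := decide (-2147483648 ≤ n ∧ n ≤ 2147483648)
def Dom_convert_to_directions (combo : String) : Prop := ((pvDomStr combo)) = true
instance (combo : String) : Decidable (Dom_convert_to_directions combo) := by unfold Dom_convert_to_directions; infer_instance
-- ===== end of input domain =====

-- B: a different algorithm — a precomputed 25-entry (prev key, next key) transition table replaces
-- A's per-letter coordinate arithmetic and move generation; conversion is table lookups only.


-- ===== PORT A =====
-- module constant DIRECTIONS; Python's [r, c] list becomes a pair
def pvDIRECTIONS : PySem.Dict Char (Int × Int) :=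
  PySem.Dict.ofList [('^', (0, 1)), ('A', (0, 2)), ('<', (1, 0)), ('v', (1, 1)), ('>', (1, 2))]

def calcDiff (p1 p2 : Int × Int) : Int × Int := (p1.1 - p2.1, p1.2 - p2.2)

-- generate_move; first is none / some "h" / some "v"; range of a negative count is empty, hence .toNat
def generateMove (diff : Int × Int) (first : Option String) : List String :=
  let horizontalMove : String := if diff.2 < 0 then "<" else ">"
  let verticalMove : String := if diff.1 < 0 then "^" else "v"
  let horizontalCount : Int := |diff.2|
  let verticalCount : Int := |diff.1|
  let (output, horizontalCount, verticalCount) :=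
    if first = some "h" then ([horizontalMove], horizontalCount - 1, verticalCount)
    else if first = some "v" then ([verticalMove], horizontalCount, verticalCount - 1)
    else ([], horizontalCount, verticalCount)
  output ++ List.replicate horizontalCount.toNat horizontalMove
         ++ List.replicate verticalCount.toNat verticalMove ++ ["A"]

-- DIRECTIONS[letter] : under Pre_ the key is present; getD default is never reached there
def convert_to_directions (combo : String) : List String :=
  (combo.toList.foldl (fun (st : List String × (Int × Int)) letter =>
    let destination := (PySem.Dict.get? pvDIRECTIONS letter).getD (0, 0)
    let diff := calcDiff destination st.2
    let out :=
      if st.2.1 = 1 ∧ st.2.2 = 0 ∧ destination.1 = 0 then st.1 ++ generateMove diff (some "h")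
      else if destination.1 = 1 ∧ destination.2 = 0 ∧ st.2.1 = 0 then st.1 ++ generateMove diff (some "v")
      else st.1 ++ generateMove diff none
    (out, destination)) ([], (0, 2))).1

-- ===== PORT B =====
-- the precomputed transition table MOVES of Source B
def pvMOVES : PySem.Dict (Char × Char) String :=
  PySem.Dict.ofList [
    (('^', '^'), "A"),   (('^', 'A'), ">A"),   (('^', '<'), "v<A"),  (('^', 'v'), "vA"),  (('^', '>'), ">vA"),
    (('A', '^'), "<A"),  (('A', 'A'), "A"),    (('A', '<'), "v<<A"), (('A', 'v'), "<vA"), (('A', '>'), "vA"),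
    (('<', '^'), ">^A"), (('<', 'A'), ">>^A"), (('<', '<'), "A"),    (('<', 'v'), ">A"),  (('<', '>'), ">>A"),
    (('v', '^'), "^A"),  (('v', 'A'), ">^A"),  (('v', '<'), "<A"),   (('v', 'v'), "A"),   (('v', '>'), ">A"),
    (('>', '^'), "<^A"), (('>', 'A'), "^A"),   (('>', '<'), "<<A"),  (('>', 'v'), "<A"),  (('>', '>'), "A")]

-- out.extend(MOVES[(prev, letter)]) appends each character as a 1-char string
def convert_to_directions_alt (combo : String) : List String :=
  (combo.toList.foldl (fun (st : List String × Char) letter =>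
    (st.1 ++ ((PySem.Dict.get? pvMOVES (st.2, letter)).getD "").toList.map (fun ch => String.mk [ch]),
     letter)) ([], 'A')).1

-- ===== PRECONDITION & SPEC =====
-- Pre_ excludes exactly the combos containing a character outside DIRECTIONS, on which A raises KeyError.
def Pre_convert_to_directions (combo : String) : Prop :=
  (combo.toList.all (fun c => ['^', 'A', '<', 'v', '>'].contains c)) = true
instance (combo : String) : Decidable (Pre_convert_to_directions combo) := by
  unfold Pre_convert_to_directions; infer_instance

def pvWitness_convert_to_directions : String := "<A"

def Spec_convert_to_directions (combo : String) (out : List String) : Prop := out = convert_to_directions_alt combo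
instance (combo : String) (out : List String) : Decidable (Spec_convert_to_directions combo out) := by unfold Spec_convert_to_directions; infer_instance

-- ===== CLAIM (what is proved, stated in full; the proofs are below) =====
def Claim_equal_convert_to_directions : Prop := ∀ (combo : String), Dom_convert_to_directions combo → Pre_convert_to_directions combo → Spec_convert_to_directions combo (convert_to_directions combo)

-- ===== LEMMAS AND PROOFS =====

def pvDest (c : Char) : Int × Int := (PySem.Dict.get? pvDIRECTIONS c).getD (0, 0)

-- what A appends for one letter at position p
def pvAStep (p : Int × Int) (letter : Char) : List String :=
  let destination := pvDest letter
  let diff := calcDiff destination p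
  if p.1 = 1 ∧ p.2 = 0 ∧ destination.1 = 0 then generateMove diff (some "h")
  else if destination.1 = 1 ∧ destination.2 = 0 ∧ p.1 = 0 then generateMove diff (some "v")
  else generateMove diff none

-- what B appends for one letter after previous key k
def pvBStep (k letter : Char) : List String :=
  ((PySem.Dict.get? pvMOVES (k, letter)).getD "").toList.map (fun ch => String.mk [ch])

set_option maxRecDepth 8000 in
lemma pvStep_eq : ∀ k ∈ ['^', 'A', '<', 'v', '>'], ∀ c ∈ ['^', 'A', '<', 'v', '>'],
    pvAStep (pvDest k) c = pvBStep k c := by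
  intro k hk c hc
  fin_cases hk <;> fin_cases hc <;> rfl

lemma pv_main : ∀ (cs : List Char) (k : Char) (acc : List String),
    (∀ c ∈ cs, c ∈ ['^', 'A', '<', 'v', '>']) → k ∈ ['^', 'A', '<', 'v', '>'] →
    (cs.foldl (fun (st : List String × (Int × Int)) letter =>
        (st.1 ++ pvAStep st.2 letter, pvDest letter)) (acc, pvDest k)).1
      = (cs.foldl (fun (st : List String × Char) letter =>
        (st.1 ++ pvBStep st.2 letter, letter)) (acc, k)).1 := by
  intro cs
  induction cs with
  | nil => intro k acc _ _; rfl
  | cons c cs ih =>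
      intro k acc hmem hk
      have hc : c ∈ ['^', 'A', '<', 'v', '>'] := hmem c (by simp)
      simp only [List.foldl_cons]
      rw [pvStep_eq k hk c hc]
      exact ih c (acc ++ pvBStep k c) (fun x hx => hmem x (by simp [hx])) hc

-- ===== VERDICT (by name: the statement is the Claim_ definition above) =====
theorem convert_to_directions_spec : Claim_equal_convert_to_directions := by
  intro combo _ hpre
  have hpre' : ∀ c ∈ combo.toList, c ∈ ['^', 'A', '<', 'v', '>'] := by
    intro c hc
    have := List.all_eq_true.mp hpre c hc
    simpa using this
  unfold Spec_convert_to_directions convert_to_directions convert_to_directions_alt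
  have h := pv_main combo.toList 'A' [] hpre' (by decide)
  rw [show (fun (st : List String × (Int × Int)) letter =>
        (st.1 ++ pvAStep st.2 letter, pvDest letter))
      = (fun (st : List String × (Int × Int)) letter =>
          let destination := (PySem.Dict.get? pvDIRECTIONS letter).getD (0, 0)
          let diff := calcDiff destination st.2
          let out :=
            if st.2.1 = 1 ∧ st.2.2 = 0 ∧ destination.1 = 0 then st.1 ++ generateMove diff (some "h")
            else if destination.1 = 1 ∧ destination.2 = 0 ∧ st.2.1 = 0 then st.1 ++ generateMove diff (some "v")
            else st.1 ++ generateMove diff none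
          (out, destination)) from by
      funext st letter
      simp only [pvAStep, pvDest]
      split_ifs <;> rfl] at h
  rw [show pvDest 'A' = (0, 2) from rfl] at h
  exact h ▸ rfl
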